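-- pv_equiv track=rewrite | github.com/mwisnowski/mtg_python_deckbuilder | code/web/routes/owned.py | _canon_color_code
-- ===== SOURCE A (Python) =====
-- def _canon_color_code(seq: list[str] | tuple[str, ...]) -> str:
--     """Canonicalize a color identity sequence to a stable code (WUBRG order, no 'C' unless only color)."""
--     order = {'W':0,'U':1,'B':2,'R':3,'G':4,'C':5}
--     uniq: list[str] = []
--     seen: set[str] = set()
--     for c in (seq or []):
--         uc = (c or '').upper()
--         if uc in order and uc not in seen:
--             seen.add(uc)
--             uniq.append(uc)
--     uniq.sort(key=lambda x: order[x])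
--     code = ''.join([c for c in uniq if c != 'C'])
--     return code or ('C' if 'C' in seen else '')
-- ===== SOURCE B (Python) =====
-- def _canon_color_code(seq):
--     """Canonicalize a color identity sequence to a stable code (WUBRG order, no 'C' unless only color)."""
--     seen = {c.upper() for c in (seq or [])}
--     code = ''.join(ch for ch in 'WUBRG' if ch in seen)
--     return code or ('C' if 'C' in seen else '')
-- ===== Notes on version B (the rewrite author's own statement) =====
-- stated objective: simpler
-- what changed: Drops A's first-occurrence dedup list, index dictionary and sort: B builds one set of uppercased entries and projects the fixed canonical string 'WUBRG' through it.
import Mathlib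
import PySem

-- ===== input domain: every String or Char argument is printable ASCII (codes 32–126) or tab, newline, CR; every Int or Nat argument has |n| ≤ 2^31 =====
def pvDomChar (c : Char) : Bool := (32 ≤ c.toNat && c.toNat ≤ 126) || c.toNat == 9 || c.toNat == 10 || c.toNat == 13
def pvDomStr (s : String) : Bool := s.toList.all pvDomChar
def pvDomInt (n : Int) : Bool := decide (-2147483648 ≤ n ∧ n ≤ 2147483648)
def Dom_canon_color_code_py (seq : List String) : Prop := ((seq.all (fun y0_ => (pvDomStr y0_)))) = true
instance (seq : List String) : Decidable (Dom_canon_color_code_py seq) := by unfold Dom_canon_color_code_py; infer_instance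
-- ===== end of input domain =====

-- B replaces A's first-occurrence dedup list + index dictionary + sort with a single set of
-- uppercased entries projected through the fixed canonical list (objective: simpler).

-- ===== PORT A =====
def canon_color_code_py (seq : List String) : String :=
  let order : PySem.Dict String Int :=
    PySem.Dict.ofList [("W", 0), ("U", 1), ("B", 2), ("R", 3), ("G", 4), ("C", 5)]
  let st : List String × PySem.Set String :=
    seq.foldl (fun st c =>
      let uc := PySem.Str.upper (if c == "" then "" else c)
      if order.contains uc && !(PySem.Set.contains st.2 uc) then
        (st.1 ++ [uc], PySem.Set.add st.2 uc)
      else st) ([], PySem.Set.empty)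
  let uniq := PySem.List.sorted st.1 (fun x => order.getD x 0) false
  let code := PySem.Str.join "" (uniq.filter (fun c => c ≠ "C"))
  if code == "" then (if PySem.Set.contains st.2 "C" then "C" else "") else code

-- ===== PORT B =====
def canon_color_code_py_alt (seq : List String) : String :=
  let seen : PySem.Set String := PySem.Set.ofList (seq.map PySem.Str.upper)
  let code := PySem.Str.join ""
    ((["W", "U", "B", "R", "G"]).filter (fun ch => PySem.Set.contains seen ch))
  if code == "" then (if PySem.Set.contains seen "C" then "C" else "") else code

-- ===== PRECONDITION & SPEC =====
def Spec_canon_color_code_py (seq : List String) (out : String) : Prop := out = canon_color_code_py_alt seq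
instance (seq : List String) (out : String) : Decidable (Spec_canon_color_code_py seq out) := by unfold Spec_canon_color_code_py; infer_instance

-- ===== CLAIM (what is proved, stated in full; the proofs are below) =====
def Claim_equal_canon_color_code_py : Prop := ∀ (seq : List String), Dom_canon_color_code_py seq → Spec_canon_color_code_py seq (canon_color_code_py seq)


-- ===== LEMMAS AND PROOFS =====
theorem pv_if_empty (c : String) : (if c == "" then "" else c) = c := by
  by_cases h : c = "" <;> simp [h]

def pvKeys (x : String) : Bool :=
  "W" == x || ("U" == x || ("B" == x || ("R" == x || ("G" == x || "C" == x))))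

def pvOrder : PySem.Dict String Int :=
  PySem.Dict.ofList [("W", 0), ("U", 1), ("B", 2), ("R", 3), ("G", 4), ("C", 5)]

theorem pv_contains_order (x : String) : pvOrder.contains x = pvKeys x := by
  simp [pvOrder, PySem.Dict.contains, PySem.Dict.ofList, PySem.Dict.update, PySem.Dict.insert,
    PySem.Dict.empty, List.foldl, pvKeys]

def pvStep (u : PySem.Set String) (c : String) : PySem.Set String :=
  if pvKeys (PySem.Str.upper c) then PySem.Set.add u (PySem.Str.upper c) else u

theorem pv_pair (seq : List String) : ∀ (u : List String),
    seq.foldl (fun (st : List String × PySem.Set String) c =>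
      let uc := PySem.Str.upper (if c == "" then "" else c)
      if pvOrder.contains uc && !(PySem.Set.contains st.2 uc) then
        (st.1 ++ [uc], PySem.Set.add st.2 uc)
      else st) (u, u)
    = (seq.foldl pvStep u, seq.foldl pvStep u) := by
  induction seq with
  | nil => intro u; rfl
  | cons c t ih =>
    intro u
    rw [List.foldl_cons, List.foldl_cons]
    have hstep : (let uc := PySem.Str.upper (if c == "" then "" else c)
        if pvOrder.contains uc && !(PySem.Set.contains ((u, u) : List String × PySem.Set String).2 uc) then
          (((u, u) : List String × PySem.Set String).1 ++ [uc], PySem.Set.add ((u, u) : List String × PySem.Set String).2 uc)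
        else ((u, u) : List String × PySem.Set String)) = (pvStep u c, pvStep u c) := by
      simp only [pv_if_empty, pv_contains_order]
      by_cases hk : pvKeys (PySem.Str.upper c) <;> by_cases hm : PySem.Str.upper c ∈ u <;>
        simp [hk, hm, pvStep, PySem.Set.add, PySem.Set.contains]
    rw [hstep]
    exact ih (pvStep u c)

def pvU (seq : List String) : PySem.Set String :=
  PySem.Set.ofList ((seq.map PySem.Str.upper).filter pvKeys)

theorem pv_fold_ofList (seq : List String) : seq.foldl pvStep [] = pvU seq := by
  rw [pvU, PySem.Set.ofList_eq_foldl, List.foldl_filter, List.foldl_map]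
  rfl

theorem pv_mem_U (seq : List String) (x : String) :
    x ∈ pvU seq ↔ pvKeys x = true ∧ x ∈ seq.map PySem.Str.upper := by
  simp [pvU, PySem.Set.mem_ofList, List.mem_filter, and_comm]

theorem pv_nodup_U (seq : List String) : (pvU seq).Nodup := PySem.Set.nodup_ofList _

theorem pv_sorted_U (seq : List String) :
    PySem.List.sorted (pvU seq) (fun x => pvOrder.getD x 0) false
      = (["W", "U", "B", "R", "G", "C"] : List String).filter (fun c => decide (c ∈ pvU seq)) := by
  apply PySem.List.sorted_eq_of_perm_of_pairwise_lt
  · rw [List.perm_ext_iff_of_nodup (List.Nodup.filter _ (by decide)) (pv_nodup_U seq)]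
    intro a
    simp only [List.mem_filter, decide_eq_true_eq, and_iff_right_iff_imp]
    intro ha
    have := ((pv_mem_U seq a).1 ha).1
    simp [pvKeys] at this
    rcases this with h | h | h | h | h | h <;> simp [← h]
  · exact List.Pairwise.filter _ (by decide)

theorem pv_filters (seq : List String) :
    (((["W", "U", "B", "R", "G", "C"] : List String).filter (fun c => decide (c ∈ pvU seq))).filter
        (fun c : String => decide (c ≠ "C")))
      = (["W", "U", "B", "R", "G"] : List String).filter (fun c => decide (c ∈ pvU seq)) := by
  simp only [List.filter_filter]
  simp [List.filter_cons]

theorem pv_contains_mem (s : List String) (x : String) :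
    PySem.Set.contains s x = decide (x ∈ s) := by
  simp [PySem.Set.contains]

-- ===== VERDICT (by name: the statement is the Claim_ definition above) =====
theorem canon_color_code_py_spec : Claim_equal_canon_color_code_py := by
  intro seq _
  unfold Spec_canon_color_code_py
  simp only [canon_color_code_py, canon_color_code_py_alt]
  rw [show PySem.Dict.ofList [("W", (0:Int)), ("U", 1), ("B", 2), ("R", 3), ("G", 4), ("C", 5)] = pvOrder from rfl]
  rw [show (PySem.Set.empty : PySem.Set String) = ([] : List String) from rfl]
  rw [pv_pair seq [], pv_fold_ofList]
  rw [pv_sorted_U, pv_filters]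
  simp only [pv_contains_mem, pv_mem_U, PySem.Set.mem_ofList]
  simp [pvKeys, List.filter_cons]
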